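-- pv_equiv track=rewrite | github.com/pwviptbl/ReconForge | plugins/katana_crawler.py | _build_seed_urls
-- ===== SOURCE A (Python) =====
-- from typing import Any, Dict, List
--
-- def _build_seed_urls(target: str, context: Dict[str, Any]) -> List[str]:
--     if target.startswith(("http://", "https://")):
--         return [target]
--
--     host = target.split("/", 1)[0].split(":", 1)[0]
--     open_ports = context.get("discoveries", {}).get("open_ports", [])
--     seeds: List[str] = []
--
--     if 80 in open_ports:
--         seeds.append(f"http://{host}")
--     if 443 in open_ports:
--         seeds.append(f"https://{host}")
--
--     # Common web alt ports.
--     for port in [8080, 8000, 8443, 3000, 5000, 5001, 9000]: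
--         if port in open_ports:
--             scheme = "https" if port in [8443, 9443] else "http"
--             seeds.append(f"{scheme}://{host}:{port}")
--
--     if not seeds:
--         seeds = [f"http://{host}", f"https://{host}"]
--
--     # Keep order + uniqueness.
--     out: List[str] = []
--     seen = set()
--     for s in seeds:
--         if s not in seen:
--             out.append(s)
--             seen.add(s)
--     return out
-- ===== SOURCE B (Python) =====
-- from typing import Any, Dict, List
--
-- # Rank of each recognized web port in the canonical emission order.
-- _RANK = {80: 0, 443: 1, 8080: 2, 8000: 3, 8443: 4, 3000: 5, 5000: 6, 5001: 7, 9000: 8}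
--
-- def _build_seed_urls(target: str, context: Dict[str, Any]) -> List[str]:
--     if target.startswith(("http://", "https://")):
--         return [target]
--     host = target.split("/", 1)[0].split(":", 1)[0]
--     open_ports = context.get("discoveries", {}).get("open_ports", [])
--     # One pass over open_ports: keep the distinct recognized ports, then order them by rank.
--     hits = sorted({p for p in open_ports if p in _RANK}, key=_RANK.__getitem__)
--     if not hits:
--         return [f"http://{host}", f"https://{host}"]
--
--     def _url(p: int) -> str:
--         scheme = "https" if p in (443, 8443) else "http"
--         return f"{scheme}://{host}" if p in (80, 443) else f"{scheme}://{host}:{p}"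
--
--     return [_url(p) for p in hits]
-- ===== Notes on version B (the rewrite author's own statement) =====
-- stated objective: alternative
-- what changed: Instead of A's fixed if-chain/port-table that scans open_ports once per known port and then deduplicates with a seen-set, B makes a single pass over open_ports collecting the distinct recognized ports into a set, restores the canonical order by sorting them with a rank dictionary as key, and formats each; no dedup pass is needed.
import Mathlib
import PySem

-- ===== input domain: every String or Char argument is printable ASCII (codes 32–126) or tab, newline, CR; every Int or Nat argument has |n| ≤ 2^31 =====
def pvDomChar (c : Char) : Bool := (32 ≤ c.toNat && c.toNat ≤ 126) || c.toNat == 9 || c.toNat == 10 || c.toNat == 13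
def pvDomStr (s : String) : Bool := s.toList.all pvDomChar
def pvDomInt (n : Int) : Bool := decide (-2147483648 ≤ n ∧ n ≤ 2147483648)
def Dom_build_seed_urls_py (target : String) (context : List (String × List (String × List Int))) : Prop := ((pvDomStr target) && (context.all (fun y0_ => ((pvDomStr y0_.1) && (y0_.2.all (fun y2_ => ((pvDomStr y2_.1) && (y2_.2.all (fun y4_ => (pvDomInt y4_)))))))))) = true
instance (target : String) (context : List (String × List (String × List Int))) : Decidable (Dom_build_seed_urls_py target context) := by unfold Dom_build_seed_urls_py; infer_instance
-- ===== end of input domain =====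

-- B replaces A's if-chain/alt-port loop (one scan of open_ports per known port, then a seen-set
-- dedup) by one pass over open_ports collecting the distinct recognized ports into a set, a sort
-- by a rank dictionary to restore the order, and a formatting map (objective: alternative).

-- ===== PORT A =====
-- host = target.split("/", 1)[0].split(":", 1)[0]; a nonempty separator always yields
-- `some` of a nonempty list, so the `getD []`/`headD ""` defaults are unreachable.
def pyHost (target : String) : String :=
  ((PySem.Str.splitMax? (((PySem.Str.splitMax? target "/" 1).getD []).headD "") ":" 1).getD []).headD ""

-- open_ports = context.get("discoveries", {}).get("open_ports", [])
def pyOpenPorts (context : List (String × List (String × List Int))) : List Int :=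
  PySem.Dict.getD (PySem.Dict.ofList ((PySem.Dict.ofList context).getD "discoveries" [])) "open_ports" ([] : List Int)

-- the 'seeds' list as A builds it: two ifs, then the for-loop over the alt ports
def pyA_seeds (host : String) (op : List Int) : List String :=
  let seeds : List String := []
  let seeds := if op.contains (80 : Int) then seeds ++ ["http://" ++ host] else seeds
  let seeds := if op.contains (443 : Int) then seeds ++ ["https://" ++ host] else seeds
  [(8080 : Int), 8000, 8443, 3000, 5000, 5001, 9000].foldl (fun acc port =>
    if op.contains port then
      acc ++ [(if ([(8443 : Int), 9443].contains port) then "https" else "http") ++ "://" ++ host ++ ":" ++ PySem.Int.toStr port]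
    else acc) seeds

-- the final 'keep order + uniqueness' loop (out list + seen set)
def pyA_dedup (seeds : List String) : List String :=
  (seeds.foldl (fun (st : List String × PySem.Set String) s =>
    if PySem.Set.contains st.2 s then st else (st.1 ++ [s], PySem.Set.add st.2 s))
    ([], PySem.Set.empty)).1

def build_seed_urls_py (target : String) (context : List (String × List (String × List Int))) : List String :=
  if PySem.Str.startswith target "http://" || PySem.Str.startswith target "https://" then
    [target]
  else
    let host := pyHost target
    let seeds := pyA_seeds host (pyOpenPorts context)
    let seeds := if seeds = [] then ["http://" ++ host, "https://" ++ host] else seeds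
    pyA_dedup seeds

-- ===== PORT B =====
-- _RANK = {80: 0, 443: 1, 8080: 2, 8000: 3, 8443: 4, 3000: 5, 5000: 6, 5001: 7, 9000: 8}
def pvRank : PySem.Dict Int Int :=
  PySem.Dict.ofList [(80, 0), (443, 1), (8080, 2), (8000, 3), (8443, 4), (3000, 5), (5000, 6), (5001, 7), (9000, 8)]

-- hits = sorted({p for p in open_ports if p in _RANK}, key=_RANK.__getitem__)
-- (__getitem__ ported as getD with default 0: every element sorted here is a key of _RANK,
-- so the default is unreachable and KeyError cannot occur; the sort key is injective on the
-- set's elements, so the result does not depend on the set's iteration order)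
def pyB_hits (op : List Int) : List Int :=
  PySem.List.sorted (PySem.Set.ofList (op.filter (fun p => PySem.Dict.contains pvRank p)))
    (fun p => PySem.Dict.getD pvRank p 0) false

-- _url(p)
def pyB_url (host : String) (p : Int) : String :=
  let scheme := if [(443 : Int), 8443].contains p then "https" else "http"
  if [(80 : Int), 443].contains p then scheme ++ "://" ++ host
  else scheme ++ "://" ++ host ++ ":" ++ PySem.Int.toStr p

def build_seed_urls_py_alt (target : String) (context : List (String × List (String × List Int))) : List String :=
  if PySem.Str.startswith target "http://" || PySem.Str.startswith target "https://" then
    [target]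
  else
    let host := pyHost target
    let hits := pyB_hits (pyOpenPorts context)
    if hits = [] then ["http://" ++ host, "https://" ++ host]
    else hits.map (pyB_url host)

-- ===== PRECONDITION & SPEC =====
def Spec_build_seed_urls_py (target : String) (context : List (String × List (String × List Int))) (out : List String) : Prop := out = build_seed_urls_py_alt target context
instance (target : String) (context : List (String × List (String × List Int))) (out : List String) : Decidable (Spec_build_seed_urls_py target context out) := by unfold Spec_build_seed_urls_py; infer_instance

-- ===== CLAIM (what is proved, stated in full; the proofs are below) =====
def Claim_equal_build_seed_urls_py : Prop := ∀ (target : String) (context : List (String × List (String × List Int))), Dom_build_seed_urls_py target context → Spec_build_seed_urls_py target context (build_seed_urls_py target context)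

-- ===== LEMMAS AND PROOFS =====

-- the known ports in emission order (= _RANK's keys sorted by rank)
def pvC : List Int := [80, 443, 8080, 8000, 8443, 3000, 5000, 5001, 9000]

-- B's sorted hit set IS the canonical list filtered by open-port membership
theorem hits_eq (op : List Int) : pyB_hits op = pvC.filter (fun p => op.contains p) := by
  unfold pyB_hits
  apply PySem.List.sorted_eq_of_perm_of_pairwise_lt
  · rw [List.perm_ext_iff_of_nodup (List.Nodup.filter _ (by decide)) (PySem.Set.nodup_ofList _)]
    intro x
    rw [List.mem_filter, PySem.Set.mem_ofList, List.mem_filter]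
    have hk : PySem.Dict.contains pvRank x = pvC.contains x := by
      rw [PySem.Dict.contains_eq_decide_mem_keys]
      have : PySem.Dict.keys pvRank = pvC := by decide
      rw [this]
      simp [pvC]
    rw [hk]
    simp only [List.contains_iff_mem]
    tauto
  · exact List.Pairwise.filter _ (by decide)

-- A's seeds list is the same filtered canonical list, formatted by B's _url
theorem seeds_eq (host : String) (op : List Int) :
    pyA_seeds host op = (pvC.filter (fun p => op.contains p)).map (pyB_url host) := by
  have hb80 : pyB_url host 80 = "http://" ++ host := rfl
  have hb443 : pyB_url host 443 = "https://" ++ host := rfl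
  have htail : (([(8080 : Int), 8000, 8443, 3000, 5000, 5001, 9000].filter (fun p => op.contains p)).map (pyB_url host))
      = ([(8080 : Int), 8000, 8443, 3000, 5000, 5001, 9000].filter (fun p => op.contains p)).map
        (fun port => (if ([(8443 : Int), 9443].contains port) then "https" else "http") ++ "://" ++ host ++ ":" ++ PySem.Int.toStr port) := by
    apply List.map_congr_left
    intro p hp
    have hp' := List.mem_of_mem_filter hp
    fin_cases hp' <;> rfl
  unfold pyA_seeds
  rw [PySem.List.foldl_append_if]
  conv_rhs => rw [show pvC = (80 : Int) :: (443 : Int) :: [(8080 : Int), 8000, 8443, 3000, 5000, 5001, 9000] from rfl,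
    List.filter_cons, List.filter_cons]
  by_cases h80 : op.contains (80 : Int) = true <;> by_cases h443 : op.contains (443 : Int) = true <;>
    simp only [h80, h443, if_true, if_false, Bool.false_eq_true, List.map_cons,
      List.nil_append, List.cons_append, htail, hb80, hb443]

-- distinctness of the generated URLs, by literal-length or suffix comparison
theorem url_ne0 (h P Q : String) (H : P.length ≠ Q.length) : P ++ h ≠ Q ++ h := by
  intro e
  have := congrArg (fun x : String => x.toList.length) e
  simp at this; omega

theorem url_ne1 (h P Q T : String) (H : P.length ≠ Q.length + 1 + T.length) :
    P ++ h ≠ Q ++ h ++ ":" ++ T := by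
  intro e
  have := congrArg (fun x : String => x.toList.length) e
  simp at this; omega

theorem url_ne2 (h P Q T U : String)
    (H : (P.length + T.length ≠ Q.length + U.length) ∨ (P = Q ∧ T ≠ U)) :
    P ++ h ++ ":" ++ T ≠ Q ++ h ++ ":" ++ U := by
  intro e
  rcases H with H | ⟨rfl, hTU⟩
  · have := congrArg (fun x : String => x.toList.length) e
    simp at this; omega
  · have := congrArg String.toList e
    simp at this
    exact hTU (String.toList_inj.mp this)

-- B's hit list, formatted, never contains a duplicate
theorem nodup_urls (host : String) (op : List Int) :
    ((pvC.filter (fun p => op.contains p)).map (pyB_url host)).Nodup := by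
  apply List.Nodup.sublist (List.Sublist.map _ List.filter_sublist)
  show (pvC.map (pyB_url host)).Pairwise (· ≠ ·)
  rw [List.pairwise_map]
  unfold pvC
  simp only [List.pairwise_cons, List.mem_cons, List.not_mem_nil, forall_eq_or_imp, pyB_url]
  norm_num
  repeat' apply And.intro
  all_goals first
    | exact trivial
    | decide
    | (apply url_ne2; decide)
    | (apply url_ne1; decide)

-- the fallback pair is duplicate-free
theorem nodup_default (host : String) :
    (["http://" ++ host, "https://" ++ host] : List String).Nodup := by
  simp only [List.nodup_cons, List.mem_singleton, List.not_mem_nil, not_false_iff, and_true,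
    List.nodup_nil]
  exact url_ne0 host "http://" "https://" (by decide)

-- the 'seen'-set dedup loop is the identity on a duplicate-free list
theorem dedup_aux (seeds : List String) (out : List String) (seen : PySem.Set String)
    (hnd : seeds.Nodup) (hdisj : ∀ s ∈ seeds, s ∉ seen) :
    (seeds.foldl (fun (st : List String × PySem.Set String) s =>
      if PySem.Set.contains st.2 s then st else (st.1 ++ [s], PySem.Set.add st.2 s))
      (out, seen)).1 = out ++ seeds := by
  induction seeds generalizing out seen with
  | nil => simp
  | cons a l ih =>
    have hna : a ∉ seen := hdisj a (by simp)
    have hc : PySem.Set.contains seen a = false := by simpa using hna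
    simp only [List.foldl_cons, hc, Bool.false_eq_true, if_false]
    rw [ih (out ++ [a]) (PySem.Set.add seen a) (List.Nodup.of_cons hnd) ?_]
    · simp
    · intro s hs
      rw [PySem.Set.mem_add]
      rintro (hmem | rfl)
      · exact hdisj s (by simp [hs]) hmem
      · exact (List.nodup_cons.mp hnd).1 hs

theorem dedup_id (seeds : List String) (hnd : seeds.Nodup) : pyA_dedup seeds = seeds := by
  unfold pyA_dedup
  simpa using dedup_aux seeds [] PySem.Set.empty hnd (by intro s _ h; exact List.not_mem_nil.elim h)

-- ===== VERDICT (by name: the statement is the Claim_ definition above) =====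
theorem build_seed_urls_py_spec : Claim_equal_build_seed_urls_py := by
  intro target context _
  unfold Spec_build_seed_urls_py build_seed_urls_py build_seed_urls_py_alt
  by_cases h : (PySem.Str.startswith target "http://" || PySem.Str.startswith target "https://") = true
  · simp only [h, if_true]
  · simp only [h, if_false, Bool.false_eq_true]
    rw [seeds_eq, hits_eq]
    by_cases he : pvC.filter (fun p => (pyOpenPorts context).contains p) = []
    · rw [he]
      simp only [List.map_nil, reduceIte]
      exact dedup_id _ (nodup_default (pyHost target))
    · have hm : (pvC.filter (fun p => (pyOpenPorts context).contains p)).map (pyB_url (pyHost target)) ≠ [] :=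
        fun hc => he (List.map_eq_nil_iff.mp hc)
      rw [if_neg hm, if_neg he, dedup_id _ (nodup_urls (pyHost target) (pyOpenPorts context))]
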